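-- pv_equiv track=rewrite | github.com/BlenderCN/Learnbgame | All_In_One/add_mesh_dual.py | triplets
-- ===== SOURCE A (Python) =====
-- def triplets(sequence):
--     """Generate consecutive triplets throughout the given sequence"""
--     it = iter(sequence)
--     l = first = next(it)
--     c = second = next(it)
--     for r in it:
--         yield l, c, r
--         l, c = c, r
--     yield l, c, first
--     yield c, first, second
-- ===== SOURCE B (Python) =====
-- def triplets(sequence):
--     """Generate consecutive triplets throughout the given sequence"""
--     seq = list(sequence)
--     n = len(seq)
--     for i in range(n):
--         yield seq[i], seq[(i + 1) % n], seq[(i + 2) % n]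
-- ===== Notes on version B (the rewrite author's own statement) =====
-- stated objective: alternative
-- what changed: Replaces the sliding l,c window with a special-cased two-yield wraparound tail by a single uniform loop over a materialized list using modular indexing seq[i], seq[(i+1)%n], seq[(i+2)%n].
import Mathlib
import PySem

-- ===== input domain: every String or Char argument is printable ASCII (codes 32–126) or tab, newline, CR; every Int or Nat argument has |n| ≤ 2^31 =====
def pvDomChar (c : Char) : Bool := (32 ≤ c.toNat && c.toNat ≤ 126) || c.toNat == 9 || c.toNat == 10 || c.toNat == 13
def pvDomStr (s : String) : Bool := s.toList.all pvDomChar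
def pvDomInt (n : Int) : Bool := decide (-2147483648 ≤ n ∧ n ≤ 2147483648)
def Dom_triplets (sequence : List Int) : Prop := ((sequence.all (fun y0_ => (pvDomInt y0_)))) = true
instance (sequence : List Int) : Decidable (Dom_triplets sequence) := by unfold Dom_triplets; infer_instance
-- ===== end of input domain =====

-- B replaces A's sliding l,c window (with two special-cased wraparound yields) by one uniform
-- loop of modular indexing over the materialized sequence; same O(n) cost (objective: alternative).


-- ===== PORT A =====
-- A: consume first two elements, slide an (l, c) window over the rest accumulating yields,
-- then the two wraparound yields. On length < 2 Python raises (excluded by Pre_); port returns [].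
def triplets (sequence : List Int) : List (Int × Int × Int) :=
  match sequence with
  | [] => []
  | [_] => []
  | first :: second :: rest =>
    let s := rest.foldl
      (fun (st : Int × Int × List (Int × Int × Int)) r =>
        (st.2.1, r, st.2.2 ++ [(st.1, st.2.1, r)]))
      (first, second, [])
    s.2.2 ++ [(s.1, s.2.1, first), (s.2.1, first, second)]

-- ===== PORT B =====
-- B: for i in range(n): yield seq[i], seq[(i+1)%n], seq[(i+2)%n].
-- Indices are always in [0, n) so Python's seq[j] is exactly getD j 0 here.
def triplets_alt (sequence : List Int) : List (Int × Int × Int) :=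
  let n := sequence.length
  (List.range n).map (fun i =>
    (sequence.getD i 0, sequence.getD ((i + 1) % n) 0, sequence.getD ((i + 2) % n) 0))

-- ===== PRECONDITION & SPEC =====
-- Pre_ excludes exactly the sequences of length < 2, on which A's generator raises
-- (StopIteration from next(), surfacing as RuntimeError).
def Pre_triplets (sequence : List Int) : Prop := 2 ≤ sequence.length
instance (sequence : List Int) : Decidable (Pre_triplets sequence) := by unfold Pre_triplets; infer_instance
def pvWitness_triplets : List Int := [1, 2, 3]

def Spec_triplets (sequence : List Int) (out : List (Int × Int × Int)) : Prop := out = triplets_alt sequence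
instance (sequence : List Int) (out : List (Int × Int × Int)) : Decidable (Spec_triplets sequence out) := by unfold Spec_triplets; infer_instance

-- ===== CLAIM (what is proved, stated in full; the proofs are below) =====
def Claim_equal_triplets : Prop := ∀ (sequence : List Int), Dom_triplets sequence → Pre_triplets sequence → Spec_triplets sequence (triplets sequence)

-- ===== LEMMAS AND PROOFS =====

-- sliding-window triple list: win l c xs = the triples A yields inside the loop
def win (l c : Int) : List Int → List (Int × Int × Int)
  | [] => []
  | r :: xs => (l, c, r) :: win c r xs

-- final (l, c) pair after A's loop
def fin (l c : Int) : List Int → Int × Int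
  | [] => (l, c)
  | r :: xs => fin c r xs

lemma foldl_char (xs : List Int) : ∀ (l c : Int) (acc : List (Int × Int × Int)),
    xs.foldl (fun (st : Int × Int × List (Int × Int × Int)) r =>
        (st.2.1, r, st.2.2 ++ [(st.1, st.2.1, r)])) (l, c, acc)
      = ((fin l c xs).1, (fin l c xs).2, acc ++ win l c xs) := by
  induction xs with
  | nil => intro l c acc; simp [fin, win]
  | cons r xs ih => intro l c acc; simp [fin, win, ih, List.append_assoc]

lemma fin_snoc (xs : List Int) : ∀ (l c y : Int), fin l c (xs ++ [y]) = ((fin l c xs).2, y) := by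
  induction xs with
  | nil => intro l c y; simp [fin]
  | cons r xs ih => intro l c y; simp [fin, ih]

lemma win_snoc (xs : List Int) : ∀ (l c y : Int),
    win l c (xs ++ [y]) = win l c xs ++ [((fin l c xs).1, (fin l c xs).2, y)] := by
  induction xs with
  | nil => intro l c y; simp [win, fin]
  | cons r xs ih => intro l c y; simp [win, fin, ih]

-- A equals the window over the sequence extended by its first two elements
lemma triplets_eq_win (a b : Int) (rest : List Int) :
    triplets (a :: b :: rest) = win a b (rest ++ [a, b]) := by
  show (rest.foldl _ (a, b, ([] : List (Int × Int × Int)))).2.2 ++ _ = _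
  rw [foldl_char]
  have h1 : rest ++ [a, b] = (rest ++ [a]) ++ [b] := by simp
  rw [h1, win_snoc, win_snoc, fin_snoc]
  simp

lemma win_length (xs : List Int) : ∀ l c, (win l c xs).length = xs.length := by
  induction xs with
  | nil => intro l c; simp [win]
  | cons r xs ih => intro l c; simp [win, ih]

lemma getD_append_lt (xs ys : List Int) (i : Nat) (h : i < xs.length) :
    (xs ++ ys).getD i 0 = xs.getD i 0 := by
  simp [List.getD_eq_getElem?_getD, List.getElem?_append_left h]

lemma getD_append_ge (xs ys : List Int) (i : Nat) (h : xs.length ≤ i) :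
    (xs ++ ys).getD i 0 = ys.getD (i - xs.length) 0 := by
  simp [List.getD_eq_getElem?_getD, List.getElem?_append_right h]

lemma win_getElem? (xs : List Int) : ∀ (l c : Int) (i : Nat), i < xs.length →
    (win l c xs)[i]? = some ((l :: c :: xs).getD i 0, (l :: c :: xs).getD (i + 1) 0, (l :: c :: xs).getD (i + 2) 0) := by
  induction xs with
  | nil => intro l c i h; simp at h
  | cons r xs ih =>
    intro l c i h
    cases i with
    | zero => simp [win]
    | succ j =>
      have hj : j < xs.length := by simpa using h
      simpa [win] using ih c r j hj

-- B equals the same window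
lemma triplets_alt_eq_win (a b : Int) (rest : List Int) :
    triplets_alt (a :: b :: rest) = win a b (rest ++ [a, b]) := by
  have hn : (a :: b :: rest).length = rest.length + 2 := by simp
  apply List.ext_getElem
  · simp [triplets_alt, win_length]
  · intro i h1 h2
    have hiN : i < rest.length + 2 := by
      simp [triplets_alt] at h1; omega
    apply Option.some.inj
    rw [← List.getElem?_eq_getElem h1, ← List.getElem?_eq_getElem h2]
    have hwlen : i < (rest ++ [a, b]).length := by simp; omega
    rw [win_getElem? (rest ++ [a, b]) a b i hwlen]
    have hEq : a :: b :: (rest ++ [a, b]) = (a :: b :: rest) ++ [a, b] := by simp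
    rw [hEq]
    -- compute B's i-th element
    have hB : (triplets_alt (a :: b :: rest))[i]? =
        some ((a :: b :: rest).getD i 0,
              (a :: b :: rest).getD ((i + 1) % (rest.length + 2)) 0,
              (a :: b :: rest).getD ((i + 2) % (rest.length + 2)) 0) := by
      simp [triplets_alt, hiN]
    rw [hB]
    -- the three components agree
    have e0 : ((a :: b :: rest) ++ [a, b]).getD i 0 = (a :: b :: rest).getD i 0 :=
      getD_append_lt _ _ _ (by omega)
    have e1 : ((a :: b :: rest) ++ [a, b]).getD (i + 1) 0
        = (a :: b :: rest).getD ((i + 1) % (rest.length + 2)) 0 := by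
      rcases Nat.lt_or_ge (i + 1) (rest.length + 2) with h | h
      · rw [Nat.mod_eq_of_lt h, getD_append_lt _ _ _ (by omega)]
      · have hi1 : i + 1 = rest.length + 2 := by omega
        rw [getD_append_ge _ _ _ (by simp; omega), hi1]
        simp
      -- second branch: i + 1 = n, wraps to index 0, value a
    have e2 : ((a :: b :: rest) ++ [a, b]).getD (i + 2) 0
        = (a :: b :: rest).getD ((i + 2) % (rest.length + 2)) 0 := by
      rcases Nat.lt_or_ge (i + 2) (rest.length + 2) with h | h
      · rw [Nat.mod_eq_of_lt h, getD_append_lt _ _ _ (by omega)]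
      · rcases Nat.lt_or_ge (i + 2) (rest.length + 3) with h' | h'
        · have hi2 : i + 2 = rest.length + 2 := by omega
          rw [getD_append_ge _ _ _ (by simp; omega), hi2]
          simp
        · have hi2 : i + 2 = rest.length + 3 := by omega
          have hmod : (i + 2) % (rest.length + 2) = 1 := by
            have h3 : i + 2 = (rest.length + 2) + 1 := by omega
            rw [h3, Nat.add_mod_left]
            exact Nat.mod_eq_of_lt (by omega)
          rw [getD_append_ge _ _ _ (by simp; omega), hmod, hi2]
          simp
    rw [e0, e1, e2]

-- ===== VERDICT (by name: the statement is the Claim_ definition above) =====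
theorem triplets_spec : Claim_equal_triplets := by
  intro sequence _ hpre
  match sequence, hpre with
  | a :: b :: rest, _ =>
    show triplets (a :: b :: rest) = triplets_alt (a :: b :: rest)
    rw [triplets_eq_win, triplets_alt_eq_win]
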